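-- pv_equiv track=rewrite | github.com/CilantroMalik/DataStructuresAlgorithms | Unit4_Recursion/stringDistance.py | strDistHelper
-- ===== SOURCE A (Python) =====
-- def strDistHelper(str1, str2):
--     # find all the letters we will have to add to string 2 (i.e. the ones that exist in string 2 but not in string 1)
--     toAdd = [letter for letter in str2 if letter not in str1]
--     if len(toAdd) > 0:  # add the letters we have to add, and add their cost, and then call the function again with added letters
--         return strDistHelper(str1 + "".join(toAdd), str2) + 20 * len(toAdd)
--     else:  # nothing left to add, now we look for copying
--         toCopy = []
--         for letter in str2:
--             diff = str2.count(letter) - str1.count(letter)  # if there is more of a letter in one string than the other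
--             if letter not in toCopy and diff > 0:
--                 toCopy.extend([letter for _ in range(diff)])  # if there are two more copies in the second string, we have to add twice
--         if len(toCopy) > 0:  # if there are letters to copy, add them to the string and add their cost, then recurse again
--             return strDistHelper(str1 + "".join(toCopy), str2) + 5 * len(toCopy)
--         else:  # finally we check for deletions
--             # at this point, str2 is entirely contained in str1, now it only remains to delete letters that were not in the original string
--             cost = 0
--             for letter in str1:
--                 diff = [str1.count(letter), str2.count(letter)]  # letters that appear more in str1 than str2 -> ones that do not belong there
--                 if diff[0] > diff[1]:
--                     str1 = str1.replace(letter, "", diff[0] - diff[1])  # replace the letter; set the replacement count to the difference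
--                     cost += 20 * (diff[0] - diff[1])  # add 20 to the cost for each deletion that occurs
--             return cost  # return this so it propagates up the call stack
-- ===== SOURCE B (Python) =====
-- from collections import Counter
--
-- def strDistHelper(str1, str2):
--     # One pass over the distinct letters of both strings, using frequency tables:
--     # a letter absent from str1 costs 20 per needed copy (addition), a letter present
--     # but deficient costs 5 per missing copy (copying), a surplus letter costs 20 per
--     # extra copy (deletion).
--     c1, c2 = Counter(str1), Counter(str2)
--     cost = 0
--     for ch in c1.keys() | c2.keys():
--         a, b = c1[ch], c2[ch]
--         if a == 0:
--             cost += 20 * b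
--         elif a < b:
--             cost += 5 * (b - a)
--         elif a > b:
--             cost += 20 * (a - b)
--     return cost
-- ===== Notes on version B (the rewrite author's own statement) =====
-- stated objective: faster
-- what changed: Replaces A's three-phase recursion (rebuilding str1 with added/copied letters and rescanning with .count and membership tests) by a single non-recursive pass over the distinct characters of both strings using Counter frequency tables, charging 20 per copy of an absent letter, 5 per missing copy of a present letter and 20 per surplus letter.
import Mathlib
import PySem

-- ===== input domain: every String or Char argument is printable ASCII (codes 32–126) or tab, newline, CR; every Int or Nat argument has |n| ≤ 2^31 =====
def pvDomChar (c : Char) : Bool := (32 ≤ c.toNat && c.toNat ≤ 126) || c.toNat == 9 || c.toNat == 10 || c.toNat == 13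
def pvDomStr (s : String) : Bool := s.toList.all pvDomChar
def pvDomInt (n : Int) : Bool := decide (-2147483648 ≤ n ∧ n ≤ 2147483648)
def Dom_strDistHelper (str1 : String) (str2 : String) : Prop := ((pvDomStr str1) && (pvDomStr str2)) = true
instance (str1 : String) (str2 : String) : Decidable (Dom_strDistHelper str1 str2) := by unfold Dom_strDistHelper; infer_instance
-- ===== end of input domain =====

-- B replaces A's three-phase recursion (add / copy / delete with repeated .count scans and
-- string rebuilding) by a single pass over the distinct letters using frequency tables.

-- ===== PORT A =====

-- toAdd = [letter for letter in str2 if letter not in str1]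
def toAddOf (s1 s2 : List Char) : List Char := s2.filter (fun c => decide (c ∉ s1))

-- the 'for letter in str2: … toCopy.extend(…)' loop; the Nat subtraction equals the Python
-- int diff because the branch requires diff > 0
def copyLoop (s1 s2 : List Char) : List Char → List Char → List Char
  | [], acc => acc
  | c :: rest, acc =>
      if c ∉ acc ∧ ((s2.count c : Int) - (s1.count c : Int) > 0) then
        copyLoop s1 s2 rest (acc ++ List.replicate (s2.count c - s1.count c) c)
      else
        copyLoop s1 s2 rest acc

-- str1.replace(letter, "", n): remove the first n occurrences of the character
def removeN : List Char → Char → Nat → List Char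
  | [], _, _ => []
  | x :: xs, c, n =>
      if n = 0 then x :: xs
      else if x = c then removeN xs c (n - 1)
      else x :: removeN xs c n

-- the deletion loop: iterates over the ORIGINAL str1 while mutating the working copy
def delLoop (s2 : List Char) : List Char → List Char → Int → Int
  | [], _, cost => cost
  | c :: rest, cur, cost =>
      if s2.count c < cur.count c then
        delLoop s2 rest (removeN cur c (cur.count c - s2.count c))
          (cost + 20 * ((cur.count c : Int) - (s2.count c : Int)))
      else
        delLoop s2 rest cur cost

-- termination measure: number of positions of s2 whose character is still deficient in s1
def needM (s1 s2 : List Char) : Nat := s2.countP (fun c => decide (s1.count c < s2.count c))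

lemma countP_lt_of_witness {α : Type} (p q : α → Bool) (l : List α)
    (h : ∀ a ∈ l, p a → q a) (x : α) (hx : x ∈ l) (hq : q x) (hp : p x = false) :
    l.countP p < l.countP q := by
  induction l with
  | nil => cases hx
  | cons a t ih =>
    rw [List.countP_cons, List.countP_cons]
    have hle : t.countP p ≤ t.countP q :=
      List.countP_mono_left (fun a ha => h a (List.mem_cons_of_mem _ ha))
    rcases List.mem_cons.mp hx with rfl | hxt
    · have e1 : (if p x = true then 1 else 0) = 0 := by simp [hp]
      have e2 : (if q x = true then 1 else 0) = 1 := by simp [hq]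
      rw [e1, e2]; omega
    · have hlt := ih (fun a ha => h a (List.mem_cons_of_mem _ ha)) hxt
      have h2 : p a = true → q a = true := h a (List.mem_cons_self ..)
      have e3 : (if p a = true then 1 else 0) ≤ (if q a = true then 1 else 0) := by
        by_cases hpa : p a = true
        · simp [hpa, h2 hpa]
        · simp [hpa]
      omega

lemma toAdd_count (s1 s2 : List Char) (c : Char) :
    (toAddOf s1 s2).count c = if c ∈ s1 then 0 else s2.count c := by
  by_cases h : c ∈ s1
  · simp only [h, if_true]
    exact List.count_eq_zero.mpr (by simp [toAddOf, List.mem_filter, h])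
  · simp only [h, if_false]
    exact List.count_filter (by simp [h])

lemma toAdd_mem (s1 s2 : List Char) (c : Char) :
    c ∈ toAddOf s1 s2 ↔ c ∈ s2 ∧ c ∉ s1 := by
  simp [toAddOf, List.mem_filter]

lemma copyLoop_count (s1 s2 : List Char) (rem : List Char) : ∀ (acc : List Char),
    (∀ d, acc.count d = if d ∈ acc then s2.count d - s1.count d else 0) →
    (∀ d ∈ acc, s1.count d < s2.count d) → ∀ c,
    (copyLoop s1 s2 rem acc).count c =
      if c ∈ acc ∨ (c ∈ rem ∧ s1.count c < s2.count c) then s2.count c - s1.count c else 0 := by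
  induction rem with
  | nil =>
    intro acc hacc hm c
    simp only [copyLoop, List.not_mem_nil, false_and, or_false]
    exact hacc c
  | cons r rest ih =>
    intro acc hacc hm c
    simp only [copyLoop]
    by_cases hcond : r ∉ acc ∧ ((s2.count r : Int) - (s1.count r : Int) > 0)
    · rw [if_pos hcond]
      obtain ⟨hrn, hdiff⟩ := hcond
      have hdef : s1.count r < s2.count r := by omega
      have hrepl : 0 < s2.count r - s1.count r := by omega
      have hmem' : ∀ d, d ∈ acc ++ List.replicate (s2.count r - s1.count r) r ↔ d ∈ acc ∨ d = r := by
        intro d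
        simp only [List.mem_append, List.mem_replicate]
        constructor
        · rintro (h | ⟨_, rfl⟩)
          · exact Or.inl h
          · exact Or.inr rfl
        · rintro (h | rfl)
          · exact Or.inl h
          · exact Or.inr ⟨by omega, rfl⟩
      have hacc' : ∀ d, (acc ++ List.replicate (s2.count r - s1.count r) r).count d =
          if d ∈ acc ++ List.replicate (s2.count r - s1.count r) r then s2.count d - s1.count d else 0 := by
        intro d
        rw [List.count_append, hacc d]
        by_cases hdr : d = r
        · subst hdr
          simp [hrn, hmem']
        · simp [List.count_replicate, hdr, hmem']
          intro h; exact absurd h.symm hdr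
      have hm' : ∀ d ∈ acc ++ List.replicate (s2.count r - s1.count r) r, s1.count d < s2.count d := by
        intro d hd
        rcases (hmem' d).mp hd with h | h
        · exact hm d h
        · subst h; exact hdef
      rw [ih _ hacc' hm' c]
      have hiff : (c ∈ acc ++ List.replicate (s2.count r - s1.count r) r ∨
          (c ∈ rest ∧ s1.count c < s2.count c)) ↔
          (c ∈ acc ∨ (c ∈ r :: rest ∧ s1.count c < s2.count c)) := by
        rw [hmem' c]
        simp only [List.mem_cons]
        constructor
        · rintro ((h | rfl) | ⟨h1, h2⟩)
          · exact Or.inl h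
          · exact Or.inr ⟨Or.inl rfl, hdef⟩
          · exact Or.inr ⟨Or.inr h1, h2⟩
        · rintro (h | ⟨(rfl | h1), h2⟩)
          · exact Or.inl (Or.inl h)
          · exact Or.inl (Or.inr rfl)
          · exact Or.inr ⟨h1, h2⟩
      rw [if_congr hiff rfl rfl]
    · rw [if_neg hcond]
      rw [ih _ hacc hm c]
      have hiff : (c ∈ acc ∨ (c ∈ rest ∧ s1.count c < s2.count c)) ↔
          (c ∈ acc ∨ (c ∈ r :: rest ∧ s1.count c < s2.count c)) := by
        simp only [List.mem_cons]
        constructor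
        · rintro (h | ⟨h1, h2⟩)
          · exact Or.inl h
          · exact Or.inr ⟨Or.inr h1, h2⟩
        · rintro (h | ⟨(rfl | h1), h2⟩)
          · exact Or.inl h
          · rcases not_and_or.mp hcond with h' | h'
            · exact Or.inl (not_not.mp h')
            · exfalso; omega
          · exact Or.inr ⟨h1, h2⟩
      rw [if_congr hiff rfl rfl]

lemma copyLoop_count_nil (s1 s2 : List Char) (c : Char) :
    (copyLoop s1 s2 s2 []).count c =
      if c ∈ s2 ∧ s1.count c < s2.count c then s2.count c - s1.count c else 0 := by
  have := copyLoop_count s1 s2 s2 [] (by simp) (by simp) c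
  simpa using this

lemma copyLoop_mem (s1 s2 : List Char) (c : Char) :
    c ∈ copyLoop s1 s2 s2 [] ↔ c ∈ s2 ∧ s1.count c < s2.count c := by
  rw [← List.count_pos_iff, copyLoop_count_nil]
  constructor
  · intro h
    by_cases hd : c ∈ s2 ∧ s1.count c < s2.count c
    · exact hd
    · rw [if_neg hd] at h; omega
  · intro hd
    rw [if_pos hd]; omega

lemma dec_add (s1 s2 : List Char) (h : 0 < (toAddOf s1 s2).length) :
    needM (s1 ++ toAddOf s1 s2) s2 < needM s1 s2 := by
  obtain ⟨x, hx⟩ := List.length_pos_iff_exists_mem.mp h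
  obtain ⟨hxs2, hxn1⟩ := (toAdd_mem s1 s2 x).mp hx
  have hcnt : ∀ c, (s1 ++ toAddOf s1 s2).count c = if c ∈ s1 then s1.count c else s2.count c := by
    intro c
    rw [List.count_append, toAdd_count]
    by_cases h1 : c ∈ s1
    · simp [h1]
    · simp [h1, List.count_eq_zero.mpr h1]
  unfold needM
  refine countP_lt_of_witness _ _ _ ?_ x hxs2 ?_ ?_
  · intro a _ hpa
    simp only [decide_eq_true_eq] at hpa ⊢
    rw [hcnt a] at hpa
    by_cases h1 : a ∈ s1
    · rwa [if_pos h1] at hpa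
    · rw [if_neg h1] at hpa
      have : s1.count a = 0 := List.count_eq_zero.mpr h1
      omega
  · simp only [decide_eq_true_eq]
    have h1 : s1.count x = 0 := List.count_eq_zero.mpr hxn1
    have h2 : 0 < s2.count x := List.count_pos_iff.mpr hxs2
    omega
  · simp only [decide_eq_false_iff_not, not_lt]
    rw [hcnt x, if_neg hxn1]

lemma dec_copy (s1 s2 : List Char) (_h0 : ¬ 0 < (toAddOf s1 s2).length)
    (h : 0 < (copyLoop s1 s2 s2 []).length) :
    needM (s1 ++ copyLoop s1 s2 s2 []) s2 < needM s1 s2 := by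
  obtain ⟨x, hx⟩ := List.length_pos_iff_exists_mem.mp h
  obtain ⟨hxs2, hxdef⟩ := (copyLoop_mem s1 s2 x).mp hx
  have hpos : 0 < needM s1 s2 :=
    List.countP_pos_iff.mpr ⟨x, hxs2, by simpa using hxdef⟩
  have hz : needM (s1 ++ copyLoop s1 s2 s2 []) s2 = 0 := by
    apply List.countP_eq_zero.mpr
    intro c hc
    simp only [decide_eq_true_eq, not_lt]
    rw [List.count_append, copyLoop_count_nil]
    split_ifs with hd
    · omega
    · simp only [hc, true_and, not_lt] at hd; omega
  omega

def strDistHelperL (s1 s2 : List Char) : Int :=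
  if h : 0 < (toAddOf s1 s2).length then
    strDistHelperL (s1 ++ toAddOf s1 s2) s2 + 20 * ((toAddOf s1 s2).length : Int)
  else if h2 : 0 < (copyLoop s1 s2 s2 []).length then
    strDistHelperL (s1 ++ copyLoop s1 s2 s2 []) s2 + 5 * ((copyLoop s1 s2 s2 []).length : Int)
  else
    delLoop s2 s1 s1 0
termination_by needM s1 s2
decreasing_by
  · exact dec_add s1 s2 h
  · exact dec_copy s1 s2 h h2

def strDistHelper (str1 : String) (str2 : String) : Int :=
  strDistHelperL str1.toList str2.toList

-- ===== PORT B =====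

-- per-letter cost from the two frequencies (helper _letterCost of Source B)
def wcost (a b : Nat) : Int :=
  if a = 0 then 20 * (b : Int)
  else if a < b then 5 * ((b : Int) - (a : Int))
  else if b < a then 20 * ((a : Int) - (b : Int))
  else 0

-- Source B: iterate once over the distinct letters of str1+str2 (Counter keys, first occurrences);
-- Counter lookups are ported as List.count (PySem.List.getD_counter)
def strDistHelper_alt (str1 : String) (str2 : String) : Int :=
  (PySem.List.dedup (str1.toList ++ str2.toList)).foldl
    (fun cost c => cost + wcost (str1.toList.count c) (str2.toList.count c)) 0

-- ===== PRECONDITION & SPEC =====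
def Spec_strDistHelper (str1 : String) (str2 : String) (out : Int) : Prop := out = strDistHelper_alt str1 str2
instance (str1 : String) (str2 : String) (out : Int) : Decidable (Spec_strDistHelper str1 str2 out) := by unfold Spec_strDistHelper; infer_instance

-- ===== CLAIM (what is proved, stated in full; the proofs are below) =====
def Claim_equal_strDistHelper : Prop := ∀ (str1 : String) (str2 : String), Dom_strDistHelper str1 str2 → Spec_strDistHelper str1 str2 (strDistHelper str1 str2)

-- ===== LEMMAS AND PROOFS =====

-- per-letter deletion cost of A's final phase
def phi (s2 cur : List Char) (c : Char) : Int :=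
  if s2.count c < cur.count c then 20 * ((cur.count c : Int) - (s2.count c : Int)) else 0

lemma removeN_count_self (xs : List Char) (c : Char) : ∀ n,
    (removeN xs c n).count c = xs.count c - n := by
  induction xs with
  | nil => intro n; simp [removeN]
  | cons x t ih =>
    intro n
    simp only [removeN]
    split_ifs with h0 hx
    · simp [h0]
    · subst hx
      rw [ih (n - 1)]
      simp only [List.count_cons_self]
      omega
    · have hcx : (x == c) = false := by simpa using hx
      simp only [List.count_cons, hcx]
      rw [ih n]
      simp

lemma removeN_count_ne (xs : List Char) (c d : Char) (hdc : d ≠ c) : ∀ n,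
    (removeN xs c n).count d = xs.count d := by
  induction xs with
  | nil => intro n; simp [removeN]
  | cons x t ih =>
    intro n
    simp only [removeN]
    split_ifs with h0 hx
    · rfl
    · subst hx
      have hdx : (x == d) = false := by simpa using fun h => hdc h.symm
      rw [ih (n - 1)]
      simp [List.count_cons, hdx]
    · simp only [List.count_cons]
      rw [ih n]

lemma delLoop_eq (s2 : List Char) (rem : List Char) : ∀ (cur : List Char) (cost : Int),
    delLoop s2 rem cur cost = cost + ∑ c ∈ rem.toFinset, phi s2 cur c := by
  induction rem with
  | nil => intro cur cost; simp [delLoop]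
  | cons r rest ih =>
    intro cur cost
    simp only [delLoop, List.toFinset_cons]
    split_ifs with h
    · set cur' := removeN cur r (cur.count r - s2.count r) with hcur'
      have hcr : cur'.count r = s2.count r := by
        rw [hcur', removeN_count_self]; omega
      have hne : ∀ d, d ≠ r → cur'.count d = cur.count d := fun d hd => removeN_count_ne cur r d hd _
      rw [ih]
      have e1 : ∑ c ∈ insert r rest.toFinset, phi s2 cur c
          = phi s2 cur r + ∑ c ∈ rest.toFinset.erase r, phi s2 cur c := by
        rw [← Finset.add_sum_erase _ _ (Finset.mem_insert_self r rest.toFinset),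
          Finset.erase_insert_eq_erase]
      have e2 : ∑ c ∈ rest.toFinset, phi s2 cur' c = ∑ c ∈ rest.toFinset.erase r, phi s2 cur' c := by
        by_cases hr : r ∈ rest.toFinset
        · rw [← Finset.add_sum_erase _ _ hr]
          have : phi s2 cur' r = 0 := by simp [phi, hcr]
          rw [this, zero_add]
        · rw [Finset.erase_eq_self.mpr hr]
      have e3 : ∑ c ∈ rest.toFinset.erase r, phi s2 cur' c
          = ∑ c ∈ rest.toFinset.erase r, phi s2 cur c := by
        apply Finset.sum_congr rfl
        intro c hc
        have : c ≠ r := (Finset.mem_erase.mp hc).1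
        simp [phi, hne c this]
      have e4 : phi s2 cur r = 20 * ((cur.count r : Int) - (s2.count r : Int)) := by
        simp [phi, h]
      rw [e1, e2, e3, e4]; ring
    · rw [ih]
      have hz : phi s2 cur r = 0 := by simp [phi, h]
      by_cases hr : r ∈ rest.toFinset
      · rw [Finset.insert_eq_self.mpr hr]
      · rw [Finset.sum_insert hr, hz, zero_add]

-- per-letter cost of B
def wcl (s1 s2 : List Char) (c : Char) : Int := wcost (s1.count c) (s2.count c)

lemma len_as_sum (l : List Char) (F : Finset Char) (h : ∀ c ∈ l, c ∈ F) :
    ((l.length : Int)) = ∑ c ∈ F, (l.count c : Int) := by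
  have h1 : ∑ c ∈ l.toFinset, (l.count c : Int) = (l.length : Int) := by
    rw [← List.sum_toFinset_count_eq_length l]
    push_cast
    rfl
  rw [← h1]
  apply Finset.sum_subset
  · intro x hx
    exact h x (List.mem_toFinset.mp hx)
  · intro x _ hx
    have : x ∉ l := fun hm => hx (List.mem_toFinset.mpr hm)
    simp [List.count_eq_zero.mpr this]

lemma toAdd_nil_sub (s1 s2 : List Char) (hA : toAddOf s1 s2 = []) : ∀ c ∈ s2, c ∈ s1 := by
  intro c hc
  by_contra hn
  have : c ∈ toAddOf s1 s2 := (toAdd_mem s1 s2 c).mpr ⟨hc, hn⟩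
  rw [hA] at this
  cases this

lemma phase3 (s1 s2 : List Char) (hA : toAddOf s1 s2 = []) (hC : copyLoop s1 s2 s2 [] = []) :
    strDistHelperL s1 s2 = ∑ c ∈ (s1 ++ s2).toFinset, wcl s1 s2 c := by
  rw [strDistHelperL]
  simp only [hA, hC, List.length_nil, lt_irrefl, dite_false]
  rw [delLoop_eq]
  have hsub := toAdd_nil_sub s1 s2 hA
  have hF : (s1 ++ s2).toFinset = s1.toFinset := by
    ext c
    simp only [List.toFinset_append, Finset.mem_union, List.mem_toFinset]
    exact ⟨fun h => h.elim id (hsub c), Or.inl⟩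
  rw [hF, zero_add]
  apply Finset.sum_congr rfl
  intro c hc
  have hc1 : c ∈ s1 := List.mem_toFinset.mp hc
  have ha : 0 < s1.count c := List.count_pos_iff.mpr hc1
  have hnodef : ¬ s1.count c < s2.count c := by
    intro hd
    have hc2 : c ∈ s2 := List.count_pos_iff.mp (by omega)
    have : c ∈ copyLoop s1 s2 s2 [] := (copyLoop_mem s1 s2 c).mpr ⟨hc2, hd⟩
    rw [hC] at this
    cases this
  simp only [phi, wcl, wcost]
  rw [if_neg (show ¬ s1.count c = 0 by omega), if_neg hnodef]

lemma phase2 (s1 s2 : List Char) (hA : toAddOf s1 s2 = []) :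
    strDistHelperL s1 s2 = ∑ c ∈ (s1 ++ s2).toFinset, wcl s1 s2 c := by
  by_cases hC : copyLoop s1 s2 s2 [] = []
  · exact phase3 s1 s2 hA hC
  · have hlen : 0 < (copyLoop s1 s2 s2 []).length := List.length_pos_iff_ne_nil.mpr hC
    rw [strDistHelperL]
    simp only [hA, List.length_nil, lt_irrefl, dite_false, hlen, dite_true]
    set tc := copyLoop s1 s2 s2 [] with htc
    have hsub := toAdd_nil_sub s1 s2 hA
    have htcc : ∀ c, tc.count c =
        if c ∈ s2 ∧ s1.count c < s2.count c then s2.count c - s1.count c else 0 :=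
      copyLoop_count_nil s1 s2
    have htcm : ∀ c ∈ tc, c ∈ s2 ∧ s1.count c < s2.count c := fun c h =>
      (copyLoop_mem s1 s2 c).mp h
    have hA' : toAddOf (s1 ++ tc) s2 = [] := by
      apply List.filter_eq_nil_iff.mpr
      intro c hc
      simp only [decide_eq_true_eq, not_not]
      exact List.mem_append.mpr (Or.inl (hsub c hc))
    have hC' : copyLoop (s1 ++ tc) s2 s2 [] = [] := by
      apply List.eq_nil_iff_forall_not_mem.mpr
      intro c hc
      obtain ⟨hc2, hdef⟩ := (copyLoop_mem (s1 ++ tc) s2 c).mp hc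
      rw [List.count_append, htcc c] at hdef
      have ha : 0 < s1.count c := List.count_pos_iff.mpr (hsub c hc2)
      by_cases hd : c ∈ s2 ∧ s1.count c < s2.count c
      · rw [if_pos hd] at hdef; omega
      · rw [if_neg hd] at hdef
        simp only [hc2, true_and, not_lt] at hd
        omega
    rw [phase3 (s1 ++ tc) s2 hA' hC']
    have hFeq : ((s1 ++ tc) ++ s2).toFinset = (s1 ++ s2).toFinset := by
      ext c
      simp only [List.toFinset_append, Finset.mem_union, List.mem_toFinset]
      constructor
      · rintro ((h | h) | h)
        · exact Or.inl h
        · exact Or.inr (htcm c h).1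
        · exact Or.inr h
      · rintro (h | h)
        · exact Or.inl (Or.inl h)
        · exact Or.inr h
    rw [hFeq]
    rw [len_as_sum tc ((s1 ++ s2).toFinset)
      (fun c hcm => List.mem_toFinset.mpr (List.mem_append.mpr (Or.inr (htcm c hcm).1)))]
    rw [Finset.mul_sum, ← Finset.sum_add_distrib]
    apply Finset.sum_congr rfl
    intro c _
    simp only [wcl, List.count_append, htcc c]
    by_cases hd : c ∈ s2 ∧ s1.count c < s2.count c
    · have ha : 0 < s1.count c := List.count_pos_iff.mpr (hsub c hd.1)
      rw [if_pos hd]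
      have e1 : s1.count c + (s2.count c - s1.count c) = s2.count c := by omega
      rw [e1]
      simp only [wcost]
      rw [if_neg (show ¬ s2.count c = 0 by omega),
          if_neg (show ¬ s2.count c < s2.count c by omega),
          if_neg (show ¬ s2.count c < s2.count c by omega),
          if_neg (show ¬ s1.count c = 0 by omega),
          if_pos hd.2]
      omega
    · rw [if_neg hd]
      simp

lemma strDistHelperL_eq_sum (s1 s2 : List Char) :
    strDistHelperL s1 s2 = ∑ c ∈ (s1 ++ s2).toFinset, wcl s1 s2 c := by
  by_cases hA : toAddOf s1 s2 = []
  · exact phase2 s1 s2 hA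
  · have hlen : 0 < (toAddOf s1 s2).length := List.length_pos_iff_ne_nil.mpr hA
    rw [strDistHelperL]
    simp only [hlen, dite_true]
    set ta := toAddOf s1 s2 with hta
    have htam : ∀ c ∈ ta, c ∈ s2 ∧ c ∉ s1 := fun c h => (toAdd_mem s1 s2 c).mp h
    have htac : ∀ c, ta.count c = if c ∈ s1 then 0 else s2.count c := toAdd_count s1 s2
    have hA' : toAddOf (s1 ++ ta) s2 = [] := by
      apply List.filter_eq_nil_iff.mpr
      intro c hc
      simp only [decide_eq_true_eq, not_not]
      apply List.mem_append.mpr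
      by_cases h1 : c ∈ s1
      · exact Or.inl h1
      · exact Or.inr ((toAdd_mem s1 s2 c).mpr ⟨hc, h1⟩)
    rw [phase2 (s1 ++ ta) s2 hA']
    have hFeq : ((s1 ++ ta) ++ s2).toFinset = (s1 ++ s2).toFinset := by
      ext c
      simp only [List.toFinset_append, Finset.mem_union, List.mem_toFinset]
      constructor
      · rintro ((h | h) | h)
        · exact Or.inl h
        · exact Or.inr (htam c h).1
        · exact Or.inr h
      · rintro (h | h)
        · exact Or.inl (Or.inl h)
        · exact Or.inr h
    rw [hFeq]
    rw [len_as_sum ta ((s1 ++ s2).toFinset)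
      (fun c hcm => List.mem_toFinset.mpr (List.mem_append.mpr (Or.inr (htam c hcm).1)))]
    rw [Finset.mul_sum, ← Finset.sum_add_distrib]
    apply Finset.sum_congr rfl
    intro c hc
    simp only [wcl, List.count_append, htac c]
    by_cases h1 : c ∈ s1
    · rw [if_pos h1]; simp
    · have ha : s1.count c = 0 := List.count_eq_zero.mpr h1
      have hc2 : c ∈ s2 := by
        rcases List.mem_append.mp (by
          have := List.mem_toFinset.mp hc
          simpa using this) with h | h
        · exact absurd h h1
        · exact h
      have hb : 0 < s2.count c := List.count_pos_iff.mpr hc2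
      rw [if_neg h1, ha, Nat.zero_add]
      simp only [wcost]
      rw [if_neg (show ¬ s2.count c = 0 by omega),
          if_neg (show ¬ s2.count c < s2.count c by omega),
          if_neg (show ¬ s2.count c < s2.count c by omega)]
      simp

lemma alt_eq_sum (s1 s2 : List Char) :
    (PySem.List.dedup (s1 ++ s2)).foldl
      (fun cost c => cost + wcost (s1.count c) (s2.count c)) 0
      = ∑ c ∈ (s1 ++ s2).toFinset, wcl s1 s2 c := by
  rw [PySem.List.foldl_add, zero_add]
  rw [← List.sum_toFinset _ (PySem.List.nodup_dedup (s1 ++ s2))]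
  apply Finset.sum_congr
  · ext c
    simp
  · intro c _
    rfl

-- ===== VERDICT (by name: the statement is the Claim_ definition above) =====
theorem strDistHelper_spec : Claim_equal_strDistHelper := by
  intro str1 str2 _
  unfold Spec_strDistHelper strDistHelper strDistHelper_alt
  rw [strDistHelperL_eq_sum, alt_eq_sum]
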